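-- pv_equiv track=rewrite | github.com/jimhorng/algorithm | min_cpu_run_task/prob1_sol3.py | prob1
-- ===== SOURCE A (Python) =====
-- import heapq
--
-- def prob1(start_times, task_length):
--     if not start_times:
--         return 0
--
--     sorted_starts = sorted(start_times)
--     final_deadline = sorted_starts[-1] + task_length  # shared deadline
--
--     cpu_heap = []  # min-heap of CPU free times
--
--     for s in sorted_starts:
--         if cpu_heap:
--             f = cpu_heap[0]                        # earliest-free CPU
--             actual_start = max(f, s)               # wait for CPU or start now
--             if actual_start + task_length <= final_deadline:
--                 heapq.heappop(cpu_heap)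
--                 heapq.heappush(cpu_heap, actual_start + task_length)
--                 continue
--         # No existing CPU can meet the deadline — open a new one
--         heapq.heappush(cpu_heap, s + task_length)  # new CPU starts task at s
--
--     return len(cpu_heap)
-- ===== SOURCE B (Python) =====
-- def prob1(start_times, task_length):
--     if not start_times:
--         return 0
--     deadline = max(start_times) + task_length
--     free = []  # free time of each CPU, plain list
--     for s in sorted(start_times):
--         if free:
--             # scan for the CPU with the minimum free time (first such index)
--             best = 0
--             for i in range(1, len(free)):
--                 if free[i] < free[best]:
--                     best = i
--             t = max(free[best], s)
--             if t + task_length <= deadline: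
--                 free[best] = t + task_length
--                 continue
--         free.append(s + task_length)
--     return len(free)
-- ===== Notes on version B (the rewrite author's own statement) =====
-- stated objective: simpler
-- what changed: Replaces the heapq min-heap by a plain list of CPU free-times with an explicit inner min-scan and in-place update, and computes the deadline from max(start_times) instead of the last element of the sorted copy.
import Mathlib
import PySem

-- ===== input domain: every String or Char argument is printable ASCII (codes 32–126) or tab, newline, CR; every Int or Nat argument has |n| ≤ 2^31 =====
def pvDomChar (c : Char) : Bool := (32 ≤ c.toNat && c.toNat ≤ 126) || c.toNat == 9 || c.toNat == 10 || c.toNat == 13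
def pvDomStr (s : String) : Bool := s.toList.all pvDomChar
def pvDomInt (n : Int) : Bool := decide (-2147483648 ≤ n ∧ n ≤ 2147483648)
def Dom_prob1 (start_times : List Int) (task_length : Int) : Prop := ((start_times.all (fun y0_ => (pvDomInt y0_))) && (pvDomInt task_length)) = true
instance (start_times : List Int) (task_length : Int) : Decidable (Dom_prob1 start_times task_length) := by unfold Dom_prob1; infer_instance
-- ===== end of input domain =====

-- B replaces A's heapq min-heap by a plain list of CPU free-times with an explicit
-- inner min-scan and an in-place update (objective: simpler data structure, same result).

-- ===== PORT A =====
-- The heapq heap is modelled by the list of its contents: cpu_heap[0] reads the minimum,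
-- heappop removes the minimum (first occurrence) and heappush appends — exact for everything
-- this program observes (the current minimum value and the final length).
def stepA (task_length final_deadline : Int) (cpu_heap : List Int) (s : Int) : List Int :=
  match PySem.List.min? cpu_heap (fun x => x) with
  | some f =>
    let actual_start := max f s
    if actual_start + task_length ≤ final_deadline then
      (cpu_heap.erase f) ++ [actual_start + task_length]
    else cpu_heap ++ [s + task_length]
  | none => cpu_heap ++ [s + task_length]

def prob1 (start_times : List Int) (task_length : Int) : Int :=
  if start_times = [] then 0
  else
    let sorted_starts := PySem.List.sorted start_times (fun x => x) false
    let final_deadline := PySem.List.pyGetD sorted_starts (-1) 0 + task_length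
    ((sorted_starts.foldl (stepA task_length final_deadline) []).length : Int)

-- ===== PORT B =====
-- inner scan: best = 0; for i in range(1, len(free)): if free[i] < free[best]: best = i
def bestIdx (free : List Int) : Int :=
  (PySem.List.pyRange 1 (PySem.List.len free) 1).foldl
    (fun best i => if PySem.List.pyGetD free i 0 < PySem.List.pyGetD free best 0 then i else best) 0

def stepB (task_length deadline : Int) (free : List Int) (s : Int) : List Int :=
  if free ≠ [] then
    let best := bestIdx free
    let t := max (PySem.List.pyGetD free best 0) s
    if t + task_length ≤ deadline then PySem.List.pySetD free best (t + task_length)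
    else free ++ [s + task_length]
  else free ++ [s + task_length]

def prob1_alt (start_times : List Int) (task_length : Int) : Int :=
  if start_times = [] then 0
  else
    let deadline := (PySem.List.max? start_times (fun x => x)).getD 0 + task_length
    (((PySem.List.sorted start_times (fun x => x) false).foldl (stepB task_length deadline) []).length : Int)

-- ===== PRECONDITION & SPEC =====
def Spec_prob1 (start_times : List Int) (task_length : Int) (out : Int) : Prop := out = prob1_alt start_times task_length
instance (start_times : List Int) (task_length : Int) (out : Int) : Decidable (Spec_prob1 start_times task_length out) := by unfold Spec_prob1; infer_instance

-- ===== CLAIM (what is proved, stated in full; the proofs are below) =====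
def Claim_equal_prob1 : Prop := ∀ (start_times : List Int) (task_length : Int), Dom_prob1 start_times task_length → Spec_prob1 start_times task_length (prob1 start_times task_length)

-- ===== LEMMAS AND PROOFS =====

-- invariant of B's inner min-scan, over the prefix range(1, k)
lemma bestIdx_fold_inv (free : List Int) :
    ∀ k : Nat, 1 ≤ k →
    ∃ b : Nat,
      (PySem.List.pyRange 1 (k : Int) 1).foldl
        (fun best i => if PySem.List.pyGetD free i 0 < PySem.List.pyGetD free best 0 then i else best) 0 = (b : Int) ∧
      b < k ∧ (∀ j, j < k → free.getD b 0 ≤ free.getD j 0) ∧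
      (∀ j, j < b → free.getD b 0 < free.getD j 0) := by
  intro k hk
  induction k, hk using Nat.le_induction with
  | base =>
    refine ⟨0, ?_, by omega, ?_, by omega⟩
    · rw [PySem.List.pyRange_one_eq_nil (by norm_num)]; rfl
    · intro j hj; interval_cases j; exact le_refl _
  | succ k hk ih =>
    obtain ⟨b, hfold, hbk, hle, hlt⟩ := ih
    have hsplit : PySem.List.pyRange 1 ((k + 1 : Nat) : Int) 1
        = PySem.List.pyRange 1 (k : Int) 1 ++ [(k : Int)] := by
      push_cast
      exact PySem.List.pyRange_one_succ_right (by exact_mod_cast hk)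
    rw [hsplit, List.foldl_append, hfold]
    simp only [List.foldl_cons, List.foldl_nil, PySem.List.pyGetD_natCast]
    by_cases hc : free.getD k 0 < free.getD b 0
    · refine ⟨k, by rw [if_pos hc], by omega, ?_, ?_⟩
      · intro j hj
        rcases Nat.lt_succ_iff_lt_or_eq.mp hj with hj | hj
        · exact le_of_lt (lt_of_lt_of_le hc (hle j hj))
        · subst hj; exact le_refl _
      · intro j hj; exact lt_of_lt_of_le hc (hle j hj)
    · refine ⟨b, by rw [if_neg hc], by omega, ?_, hlt⟩
      intro j hj
      rcases Nat.lt_succ_iff_lt_or_eq.mp hj with hj | hj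
      · exact hle j hj
      · subst hj; exact not_lt.mp hc

-- B's scan returns the first index of the minimum free time
lemma bestIdx_spec (free : List Int) (h : free ≠ []) :
    ∃ b : Nat, bestIdx free = (b : Int) ∧ b < free.length ∧
      (∀ j, j < free.length → free.getD b 0 ≤ free.getD j 0) ∧
      (∀ j, j < b → free.getD b 0 < free.getD j 0) := by
  have hlen : 1 ≤ free.length := by
    cases free with
    | nil => exact absurd rfl h
    | cons x t => simp
  obtain ⟨b, hfold, hbk, hle, hlt⟩ := bestIdx_fold_inv free free.length hlen
  exact ⟨b, by simpa [bestIdx, PySem.List.len] using hfold, hbk, hle, hlt⟩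

-- the value at such an index is the minimum of the list (as a value)
lemma getD_best_isMin (free : List Int) (b : Nat) (hb : b < free.length)
    (hle : ∀ j, j < free.length → free.getD b 0 ≤ free.getD j 0) :
    free.getD b 0 ∈ free ∧ ∀ y ∈ free, free.getD b 0 ≤ y := by
  constructor
  · rw [List.getD_eq_getElem free 0 hb]; exact List.getElem_mem hb
  · intro y hy
    obtain ⟨j, hj, rfl⟩ := List.mem_iff_getElem.mp hy
    have := hle j hj
    rwa [List.getD_eq_getElem free 0 hj] at this

-- PySem.List.min? (no key) under a permutation: the minimum value agrees
lemma min?_id_eq_of_isMin (h : List Int) (m : Int) (hmem : m ∈ h) (hmin : ∀ y ∈ h, m ≤ y)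
    (f : Int) (hf : PySem.List.min? h (fun x => x) = some f) : f = m := by
  have hfm : f ∈ h := PySem.List.min?_mem hf
  have hfl : ∀ y ∈ h, f ≤ y := PySem.List.min?_isMin hf
  exact le_antisymm (hfl m hmem) (hmin f hfm)

-- replacing the first minimum in place is, up to permutation, erasing it and appending
lemma set_perm_erase_append (free : List Int) (b : Nat) (hb : b < free.length)
    (hlt : ∀ j, j < b → free.getD b 0 < free.getD j 0) (v : Int) :
    (free.set b v).Perm (free.erase (free.getD b 0) ++ [v]) := by
  have hgetf : free[b] = free.getD b 0 := (List.getD_eq_getElem free 0 hb).symm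
  obtain ⟨m, hm⟩ : ∃ m, free.getD b 0 = m := ⟨_, rfl⟩
  rw [hm] at hgetf hlt ⊢
  have hdecomp : free = free.take b ++ m :: free.drop (b + 1) := by
    conv_lhs => rw [← List.take_append_drop b free]
    rw [List.drop_eq_getElem_cons hb, hgetf]
  have hnot : m ∉ free.take b := by
    intro hmem
    obtain ⟨j, hj, hjv⟩ := List.mem_iff_getElem.mp hmem
    have hjb : j < b := lt_of_lt_of_le hj (by simp [List.length_take])
    have hjlen : j < free.length := lt_trans hjb hb
    rw [List.getElem_take] at hjv
    have h2 := hlt j hjb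
    rw [List.getD_eq_getElem free 0 hjlen, hjv] at h2
    exact lt_irrefl _ h2
  have herase : free.erase m = free.take b ++ free.drop (b + 1) := by
    conv_lhs => rw [hdecomp]
    rw [List.erase_append_right _ hnot, List.erase_cons_head]
  have hset : free.set b v = free.take b ++ v :: free.drop (b + 1) := by
    conv_lhs => rw [hdecomp]
    rw [List.set_append]
    simp [List.length_take, Nat.min_eq_left (le_of_lt hb)]
  rw [hset, herase]
  exact List.perm_middle.trans (List.perm_append_singleton v _).symm

-- one loop step preserves the permutation between A's heap and B's free-list
lemma step_perm (L D : Int) (s : Int) (hA hB : List Int) (h : hA.Perm hB) :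
    (stepA L D hA s).Perm (stepB L D hB s) := by
  by_cases hBe : hB = []
  · subst hBe
    have hAe : hA = [] := h.eq_nil
    subst hAe
    simp [stepA, stepB, PySem.List.min?]
  · have hAe : hA ≠ [] := by
      intro hc; subst hc; exact hBe h.symm.eq_nil
    obtain ⟨f, hf⟩ : ∃ f, PySem.List.min? hA (fun x => x) = some f := by
      cases hmin : PySem.List.min? hA (fun x => x) with
      | none => exact absurd ((PySem.List.min?_eq_none_iff _ _).mp hmin) hAe
      | some f => exact ⟨f, rfl⟩
    obtain ⟨b, hbest, hb, hle, hlt⟩ := bestIdx_spec hB hBe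
    obtain ⟨hmemB, hminB⟩ := getD_best_isMin hB b hb hle
    have hfeq : f = hB.getD b 0 := by
      refine min?_id_eq_of_isMin hA _ (h.mem_iff.mpr hmemB) ?_ f hf
      intro y hy; exact hminB y (h.mem_iff.mp hy)
    unfold stepA stepB
    rw [hf, if_pos hBe, hbest]
    simp only [PySem.List.pyGetD_natCast, PySem.List.pySetD_natCast]
    rw [← hfeq]
    by_cases hcond : max f s + L ≤ D
    · rw [if_pos hcond, if_pos hcond]
      have hp1 : (hA.erase f ++ [max f s + L]).Perm (hB.erase f ++ [max f s + L]) :=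
        (h.erase f).append_right _
      have hp2 : (hB.set b (max f s + L)).Perm (hB.erase f ++ [max f s + L]) := by
        rw [hfeq]; exact set_perm_erase_append hB b hb hlt _
      exact hp1.trans hp2.symm
    · rw [if_neg hcond, if_neg hcond]
      exact h.append_right _

lemma loop_perm (L D : Int) (xs : List Int) : ∀ (hA hB : List Int), hA.Perm hB →
    (xs.foldl (stepA L D) hA).Perm (xs.foldl (stepB L D) hB) := by
  induction xs with
  | nil => intro hA hB h; simpa using h
  | cons s rest ih =>
    intro hA hB h
    simp only [List.foldl_cons]
    exact ih _ _ (step_perm L D s hA hB h)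

-- sorted(xs)[-1] = max(xs) for nonempty xs
lemma deadline_eq (xs : List Int) (h : xs ≠ []) :
    PySem.List.pyGetD (PySem.List.sorted xs (fun x => x) false) (-1) 0
      = (PySem.List.max? xs (fun x => x)).getD 0 := by
  have hs : PySem.List.sorted xs (fun x => x) false ≠ [] := by
    rw [ne_eq, PySem.List.sorted_eq_nil_iff]; exact h
  obtain ⟨M, hM⟩ : ∃ M, PySem.List.max? xs (fun x => x) = some M := by
    cases hmax : PySem.List.max? xs (fun x => x) with
    | none => exact absurd ((PySem.List.max?_eq_none_iff _ _).mp hmax) h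
    | some M => exact ⟨M, rfl⟩
  rw [PySem.List.pyGetD_neg_one _ 0 hs, hM]
  simp only [Option.getD_some]
  have hlastmem : (PySem.List.sorted xs (fun x => x) false).getLast hs ∈ xs := by
    rw [← PySem.List.mem_sorted (key := fun x => x) (rev := false)]
    exact List.getLast_mem hs
  have h1 : (PySem.List.sorted xs (fun x => x) false).getLast hs ≤ M :=
    PySem.List.max?_isMax hM _ hlastmem
  have h2 : M ≤ (PySem.List.sorted xs (fun x => x) false).getLast hs := by
    have hMmem : M ∈ PySem.List.sorted xs (fun x => x) false := by
      rw [PySem.List.mem_sorted]; exact PySem.List.max?_mem hM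
    obtain ⟨p, hp, hpv⟩ := List.mem_iff_getElem.mp hMmem
    rw [List.getLast_eq_getElem]
    have hmono := PySem.List.sorted_id_getElem_mono xs
      (p := p) (q := (PySem.List.sorted xs (fun x => x) false).length - 1)
      (by omega) (by omega)
    rw [← hpv]
    exact hmono
  exact le_antisymm h1 h2

-- ===== VERDICT (by name: the statement is the Claim_ definition above) =====
theorem prob1_spec : Claim_equal_prob1 := by
  intro start_times task_length _
  unfold Spec_prob1 prob1 prob1_alt
  by_cases he : start_times = []
  · simp [he]
  · simp only [if_neg he]
    rw [deadline_eq start_times he]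
    exact congrArg (fun n : Nat => (n : Int))
      (List.Perm.length_eq (loop_perm task_length
        ((PySem.List.max? start_times (fun x => x)).getD 0 + task_length)
        (PySem.List.sorted start_times (fun x => x) false) [] [] (List.Perm.refl [])))
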